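-- pv_equiv track=rewrite | github.com/hechmi06/hechmi_marketingAgents | src/agents/marketing_agent.py | _format_companies
-- ===== SOURCE A (Python) =====
-- def _format_companies(companies: list[dict]) -> str:
--     lines = []
--     for c in companies:
--         line = f"- {c.get('name', 'N/A')}"
--         if c.get('email'):
--             line += f" | email: {c['email']}"
--         if c.get('address'):
--             line += f" | adresse: {c['address']}"
--         if c.get('confidence'):
--             line += f" | score: {c['confidence']}"
--         lines.append(line)
--     return "\n".join(lines) if lines else "Aucune entreprise disponible"
-- ===== SOURCE B (Python) =====
-- def _format_companies(companies: list[dict]) -> str: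
--     spec = [('email', 'email'), ('address', 'adresse'), ('confidence', 'score')]
--     lines = [
--         " | ".join(
--             [f"- {c.get('name', 'N/A')}"]
--             + [f"{label}: {c[key]}" for key, label in spec if c.get(key)]
--         )
--         for c in companies
--     ]
--     return "\n".join(lines) if lines else "Aucune entreprise disponible"
-- ===== Notes on version B (the rewrite author's own statement) =====
-- stated objective: idiomatic
-- what changed: Replaces A's three copy-pasted per-field if-blocks with a (key,label) field-spec table driving one loop, and builds each line by ' | '.join of collected parts instead of repeated string concatenation.
import Mathlib
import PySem

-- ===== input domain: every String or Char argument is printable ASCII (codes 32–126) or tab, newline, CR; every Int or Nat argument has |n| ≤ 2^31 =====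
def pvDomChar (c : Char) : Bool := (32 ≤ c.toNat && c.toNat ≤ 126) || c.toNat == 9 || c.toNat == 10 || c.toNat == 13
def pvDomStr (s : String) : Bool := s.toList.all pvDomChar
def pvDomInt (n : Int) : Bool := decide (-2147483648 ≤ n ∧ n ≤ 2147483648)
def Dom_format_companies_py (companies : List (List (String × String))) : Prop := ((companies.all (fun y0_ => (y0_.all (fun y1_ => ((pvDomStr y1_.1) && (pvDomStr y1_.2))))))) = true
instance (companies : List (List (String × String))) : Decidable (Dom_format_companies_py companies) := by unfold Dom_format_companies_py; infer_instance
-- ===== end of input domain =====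

-- B replaces A's hand-written chain of three copy-pasted `if` blocks by a field-spec
-- table ((key, label) pairs) driving one loop, and builds each line by joining parts
-- with " | " instead of string concatenation; objective: more idiomatic, same cost.

-- ===== PORT A =====
-- one company's line, exactly A's loop body (dict lookup = first match on the assoc list)
def pvLineA (c : List (String × String)) : String :=
  let d := PySem.Dict.mk c
  let line := "- " ++ d.getD "name" "N/A"
  let line := match d.get? "email" with            -- if c.get('email'):
    | some v => if v ≠ "" then line ++ " | email: " ++ v else line
    | none => line
  let line := match d.get? "address" with
    | some v => if v ≠ "" then line ++ " | adresse: " ++ v else line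
    | none => line
  let line := match d.get? "confidence" with
    | some v => if v ≠ "" then line ++ " | score: " ++ v else line
    | none => line
  line

def format_companies_py (companies : List (List (String × String))) : String :=
  let lines := companies.foldl (fun ls c => ls ++ [pvLineA c]) []
  if lines ≠ [] then PySem.Str.join "\n" lines else "Aucune entreprise disponible"

-- ===== PORT B =====
def pvSpecTable : List (String × String) :=
  [("email", "email"), ("address", "adresse"), ("confidence", "score")]

-- one company's line: spec-table loop collecting the truthy parts, then " | ".join
def pvLineB (c : List (String × String)) : String :=
  let d := PySem.Dict.mk c
  let parts := ["- " ++ d.getD "name" "N/A"] ++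
    (pvSpecTable.foldl (fun ps kl =>
      match d.get? kl.1 with
      | some v => if v ≠ "" then ps ++ [kl.2 ++ ": " ++ v] else ps
      | none => ps) [])
  PySem.Str.join " | " parts

def format_companies_py_alt (companies : List (List (String × String))) : String :=
  let lines := companies.map pvLineB
  if lines ≠ [] then PySem.Str.join "\n" lines else "Aucune entreprise disponible"

-- ===== PRECONDITION & SPEC =====
def Spec_format_companies_py (companies : List (List (String × String))) (out : String) : Prop := out = format_companies_py_alt companies
instance (companies : List (List (String × String))) (out : String) : Decidable (Spec_format_companies_py companies out) := by unfold Spec_format_companies_py; infer_instance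

-- ===== CLAIM (what is proved, stated in full; the proofs are below) =====
def Claim_equal_format_companies_py : Prop := ∀ (companies : List (List (String × String))), Dom_format_companies_py companies → Spec_format_companies_py companies (format_companies_py companies)

-- ===== LEMMAS AND PROOFS =====

-- the two per-company line builders agree (8-way case split on the three optional fields)
theorem pvLineA_eq_pvLineB (c : List (String × String)) : pvLineA c = pvLineB c := by
  unfold pvLineA pvLineB pvSpecTable
  simp only [List.foldl]
  rcases (PySem.Dict.mk c).get? "email" with _ | v1 <;>
  rcases (PySem.Dict.mk c).get? "address" with _ | v2 <;>
  rcases (PySem.Dict.mk c).get? "confidence" with _ | v3 <;> dsimp only <;>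
  all_goals apply String.toList_inj.mp
  all_goals first
    | (split_ifs <;>
        simp [PySem.Str.join, PySem.Chars.join, String.toList_append, List.intercalate,
          List.intersperse])
    | simp [PySem.Str.join, PySem.Chars.join, String.toList_append, List.intercalate,
        List.intersperse]

theorem format_companies_py_spec : Claim_equal_format_companies_py := by
  intro companies _
  unfold Spec_format_companies_py format_companies_py format_companies_py_alt
  rw [PySem.List.foldl_append_singleton_eq_map, funext pvLineA_eq_pvLineB]
  simp
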